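-- pv_equiv track=rewrite | github.com/tatiasha/MBA_retail | src/experiments/experiment_seasons_d.py | prediction
-- ===== SOURCE A (Python) =====
-- def prediction(days):
--     pred = []
--     month_size = [31, 28, 31, 30, 31, 30, 31, 31, 30, 31, 30, 31]
--     for i in days:
--         t = -1
--         if i <= sum(month_size[:2]):
--             t = 3
--         else:
--             if i <= sum(month_size[:5]):
--                 t = 0
--             else:
--                 if i <= sum(month_size[:8]):
--                     t = 1
--                 else:
--                     if i <= sum(month_size[:11]):
--                         t = 2
--                     else:
--                         t = 4
--
--         pred.append(t)
--     return pred
-- ===== SOURCE B (Python) =====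
-- # Different strategy: precompute a 365-entry day->season lookup table once
-- # (each month contributes month_size copies of its month's season code),
-- # then map each day by clamping into 1..365 and doing one O(1) table read.
-- MONTH_SIZE = [31, 28, 31, 30, 31, 30, 31, 31, 30, 31, 30, 31]
-- MONTH_SEASON = [3, 3, 0, 0, 0, 1, 1, 1, 2, 2, 2, 4]
-- DAY_TABLE = [s for m, s in zip(MONTH_SIZE, MONTH_SEASON) for _ in range(m)]
--
-- def prediction(days):
--     return [DAY_TABLE[min(max(i, 1), 365) - 1] for i in days]
-- ===== Notes on version B (the rewrite author's own statement) =====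
-- stated objective: alternative
-- what changed: Replaces the per-element threshold cascade (which recomputes slice sums) by a precomputed 365-entry day-to-season lookup table (each month expanded into copies of its season code); each element is clamped into the table's index range and answered by one direct table read, with no threshold comparisons.
import Mathlib
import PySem

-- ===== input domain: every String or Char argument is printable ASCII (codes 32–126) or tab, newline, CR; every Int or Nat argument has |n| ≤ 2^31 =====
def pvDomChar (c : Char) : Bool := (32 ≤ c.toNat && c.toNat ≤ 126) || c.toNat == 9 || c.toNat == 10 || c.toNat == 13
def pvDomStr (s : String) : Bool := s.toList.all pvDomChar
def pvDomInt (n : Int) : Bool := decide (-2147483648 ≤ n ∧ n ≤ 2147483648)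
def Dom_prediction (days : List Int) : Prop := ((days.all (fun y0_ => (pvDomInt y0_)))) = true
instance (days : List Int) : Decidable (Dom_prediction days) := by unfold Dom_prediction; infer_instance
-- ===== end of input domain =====

-- header: B precomputes a 365-entry day→season lookup table (each month expanded to copies of its season code) and answers each element by a clamped O(1) table read instead of A's threshold cascade; same return value, no side effects.
-- ===== PORT A =====
def predLoop (month_size : List Int) (pred : List Int) (ds : List Int) : List Int :=
  match ds with
  | [] => pred
  | i :: rest =>
    let t : Int :=
      if i ≤ (PySem.List.slice month_size none (some 2)).sum then 3
      else if i ≤ (PySem.List.slice month_size none (some 5)).sum then 0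
      else if i ≤ (PySem.List.slice month_size none (some 8)).sum then 1
      else if i ≤ (PySem.List.slice month_size none (some 11)).sum then 2
      else 4
    predLoop month_size (pred ++ [t]) rest

def prediction (days : List Int) : List Int :=
  predLoop [31, 28, 31, 30, 31, 30, 31, 31, 30, 31, 30, 31] [] days

-- ===== PORT B =====
def monthSize : List Int := [31, 28, 31, 30, 31, 30, 31, 31, 30, 31, 30, 31]
def monthSeason : List Int := [3, 3, 0, 0, 0, 1, 1, 1, 2, 2, 2, 4]
-- DAY_TABLE = [s for m, s in zip(MONTH_SIZE, MONTH_SEASON) for _ in range(m)]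
def dayTable : List Int := (monthSize.zip monthSeason).flatMap (fun p => List.replicate p.1.toNat p.2)

-- Python's DAY_TABLE[idx]: idx = min(max(i,1),365) - 1 is provably in 0..364, so getD is exact here.
def prediction_alt (days : List Int) : List Int :=
  days.map (fun i => dayTable.getD ((min (max i 1) 365 - 1).toNat) 0)

-- ===== PRECONDITION & SPEC =====
def Spec_prediction (days : List Int) (out : List Int) : Prop := out = prediction_alt days
instance (days : List Int) (out : List Int) : Decidable (Spec_prediction days out) := by unfold Spec_prediction; infer_instance

-- ===== CLAIM =====
def Claim_equal_prediction : Prop := ∀ (days : List Int), Dom_prediction days → Spec_prediction days (prediction days)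

-- ===== LEMMAS AND PROOFS =====
-- characterisation of the lookup table entries by index region
def tableExpect (j : Nat) : Int :=
  if j ≤ 58 then 3 else if j ≤ 150 then 0 else if j ≤ 242 then 1 else if j ≤ 333 then 2 else 4

set_option maxRecDepth 8000 in
theorem dayTable_getD (j : Nat) (hj : j < 365) : dayTable.getD j 0 = tableExpect j := by
  have h : ((List.range 365).all (fun j => dayTable.getD j 0 == tableExpect j)) = true := by decide
  rw [List.all_eq_true] at h
  have := h j (List.mem_range.mpr hj)
  exact beq_iff_eq.mp this

theorem pred_elem (i : Int) :
    (if i ≤ (PySem.List.slice [(31:Int),28,31,30,31,30,31,31,30,31,30,31] none (some 2)).sum then (3:Int)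
     else if i ≤ (PySem.List.slice [(31:Int),28,31,30,31,30,31,31,30,31,30,31] none (some 5)).sum then 0
     else if i ≤ (PySem.List.slice [(31:Int),28,31,30,31,30,31,31,30,31,30,31] none (some 8)).sum then 1
     else if i ≤ (PySem.List.slice [(31:Int),28,31,30,31,30,31,31,30,31,30,31] none (some 11)).sum then 2
     else 4)
    = dayTable.getD ((min (max i 1) 365 - 1).toNat) 0 := by
  have h2 : (PySem.List.slice [(31:Int),28,31,30,31,30,31,31,30,31,30,31] none (some 2)).sum = 59 := by decide
  have h5 : (PySem.List.slice [(31:Int),28,31,30,31,30,31,31,30,31,30,31] none (some 5)).sum = 151 := by decide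
  have h8 : (PySem.List.slice [(31:Int),28,31,30,31,30,31,31,30,31,30,31] none (some 8)).sum = 243 := by decide
  have h11 : (PySem.List.slice [(31:Int),28,31,30,31,30,31,31,30,31,30,31] none (some 11)).sum = 334 := by decide
  rw [h2, h5, h8, h11]
  have hj : (min (max i 1) 365 - 1).toNat < 365 := by omega
  rw [dayTable_getD _ hj]
  unfold tableExpect
  split_ifs <;> omega

theorem predLoop_eq (ds acc : List Int) :
    predLoop [31, 28, 31, 30, 31, 30, 31, 31, 30, 31, 30, 31] acc ds
      = acc ++ ds.map (fun i => dayTable.getD ((min (max i 1) 365 - 1).toNat) 0) := by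
  induction ds generalizing acc with
  | nil => simp [predLoop]
  | cons i rest ih =>
    rw [predLoop, ih]
    simp [pred_elem i]

-- ===== VERDICT =====
theorem prediction_spec : Claim_equal_prediction := by
  intro days _
  unfold Spec_prediction prediction prediction_alt
  simpa using predLoop_eq days []
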